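-- pv_equiv track=rewrite | github.com/Abdellah-BELMAARIS/FreeCodeCampChallenging | challenge_7/space_week.py | find_landing_spot
-- ===== SOURCE A (Python) =====
-- def find_landing_spot(matrix):
--     rows = len(matrix)
--     cols = len(matrix[0])
--
--     safest_spot = None
--     min_danger = float('inf')
--
--     directions = [(-1, 0), (1, 0), (0, -1), (0, 1)]
--
--     for i in range(rows):
--         for j in range(cols):
--             if matrix[i][j] == 0:
--                 danger_sum = 0
--
--                 for dx, dy in directions:
--                     ni, nj = i + dx, j + dy
--
--                     if 0 <= ni < rows and 0 <= nj < cols: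
--                         danger_sum += matrix[ni][nj]
--
--                 if danger_sum < min_danger:
--                     min_danger = danger_sum
--                     safest_spot = [i, j]
--
--     return safest_spot
-- ===== SOURCE B (Python) =====
-- def find_landing_spot(matrix):
--     rows = len(matrix)
--     cols = len(matrix[0])
--
--     # scatter: build a full danger table by pushing each cell's value
--     # onto its in-bounds orthogonal neighbours
--     danger = [[0] * cols for _ in range(rows)]
--     for i in range(rows):
--         for j in range(cols):
--             v = matrix[i][j]
--             for ni, nj in ((i - 1, j), (i + 1, j), (i, j - 1), (i, j + 1)):
--                 if 0 <= ni < rows and 0 <= nj < cols: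
--                     danger[ni][nj] += v
--
--     # row-major scan: first zero cell with strictly smallest danger
--     best = None
--     for i in range(rows):
--         for j in range(cols):
--             if matrix[i][j] == 0 and (best is None or danger[i][j] < best[0]):
--                 best = (danger[i][j], [i, j])
--     return best[1] if best is not None else None
-- ===== Notes on version B (the rewrite author's own statement) =====
-- stated objective: alternative
-- what changed: B materializes a separate danger table by scattering each cell's value onto its in-bounds neighbours, then does one row-major scan keeping the first zero cell with strictly smallest danger, instead of A's per-zero-cell gather of the four neighbours interleaved with the running minimum.
import Mathlib
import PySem

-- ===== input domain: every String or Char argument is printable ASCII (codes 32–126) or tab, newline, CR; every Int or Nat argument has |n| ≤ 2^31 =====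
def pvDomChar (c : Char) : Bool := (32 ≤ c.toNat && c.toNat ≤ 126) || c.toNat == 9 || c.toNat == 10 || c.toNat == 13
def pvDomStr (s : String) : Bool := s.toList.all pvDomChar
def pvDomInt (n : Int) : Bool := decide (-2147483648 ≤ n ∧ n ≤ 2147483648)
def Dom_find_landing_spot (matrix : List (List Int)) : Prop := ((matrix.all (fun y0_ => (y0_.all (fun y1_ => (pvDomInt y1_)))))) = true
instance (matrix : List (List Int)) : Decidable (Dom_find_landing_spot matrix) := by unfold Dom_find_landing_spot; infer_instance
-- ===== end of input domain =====

-- B replaces A's per-zero-cell gather of the four neighbours by a materialized danger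
-- table filled by scattering each cell's value onto its neighbours, followed by one
-- row-major selection scan (objective: alternative decomposition, same asymptotic cost).

-- ===== PORT A =====
def pvDirsA : List (Int × Int) := [(-1, 0), (1, 0), (0, -1), (0, 1)]

-- the inner 'for dx, dy in directions' loop computing danger_sum at zero cell (i, j)
def pvGatherA (matrix : List (List Int)) (rows cols : Nat) (i j : Nat) : Int :=
  pvDirsA.foldl (fun d dir =>
    let ni : Int := (i : Int) + dir.1
    let nj : Int := (j : Int) + dir.2
    if 0 ≤ ni ∧ ni < (rows : Int) ∧ 0 ≤ nj ∧ nj < (cols : Int) then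
      d + ((matrix.getD ni.toNat []).getD nj.toNat 0)
    else d) 0

-- the body of A's double loop, acting on the state (safest_spot, min_danger);
-- min_danger = none models float('inf') (an int is < inf, so the first zero cell always wins)
def pvStepA (matrix : List (List Int)) (rows cols : Nat)
    (s : Option (List Int) × Option Int) (c : Nat × Nat) : Option (List Int) × Option Int :=
  if (matrix.getD c.1 []).getD c.2 0 = 0 then
    let d := pvGatherA matrix rows cols c.1 c.2
    match s.2 with
    | none => (some [(c.1 : Int), (c.2 : Int)], some d)
    | some m => if d < m then (some [(c.1 : Int), (c.2 : Int)], some d) else s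
  else s

def find_landing_spot (matrix : List (List Int)) : Option (List Int) :=
  let rows := matrix.length
  -- cols = len(matrix[0]); Pre_ excludes matrix = [] where Python raises IndexError
  let cols := (matrix.getD 0 []).length
  ((List.range rows).foldl (fun s i =>
      (List.range cols).foldl (fun s j => pvStepA matrix rows cols s (i, j)) s)
    ((none, none) : Option (List Int) × Option Int)).1

-- ===== PORT B =====
-- danger[ni][nj] += v
def pvBump (g : List (List Int)) (ni nj : Nat) (v : Int) : List (List Int) :=
  g.modify ni (fun row => row.modify nj (· + v))

-- the body of B's scatter loop at cell (i, j): push matrix[i][j] onto in-bounds neighbours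
def pvScatterB (matrix : List (List Int)) (rows cols : Nat)
    (g : List (List Int)) (c : Nat × Nat) : List (List Int) :=
  let v := (matrix.getD c.1 []).getD c.2 0
  [((c.1 : Int) - 1, (c.2 : Int)), ((c.1 : Int) + 1, (c.2 : Int)),
   ((c.1 : Int), (c.2 : Int) - 1), ((c.1 : Int), (c.2 : Int) + 1)].foldl
    (fun g nb =>
      if 0 ≤ nb.1 ∧ nb.1 < (rows : Int) ∧ 0 ≤ nb.2 ∧ nb.2 < (cols : Int) then
        pvBump g nb.1.toNat nb.2.toNat v
      else g) g

-- danger[i][j], i.e. B's danger-table read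
def pvRead (g : List (List Int)) (p q : Nat) : Int := (g.getD p []).getD q 0

-- the body of B's selection loop: keep the first zero cell of strictly smallest danger
def pvSelB (matrix danger : List (List Int))
    (best : Option (Int × List Int)) (c : Nat × Nat) : Option (Int × List Int) :=
  if (matrix.getD c.1 []).getD c.2 0 = 0 then
    match best with
    | none => some (pvRead danger c.1 c.2, [(c.1 : Int), (c.2 : Int)])
    | some b =>
      if pvRead danger c.1 c.2 < b.1 then
        some (pvRead danger c.1 c.2, [(c.1 : Int), (c.2 : Int)])
      else best
  else best

def find_landing_spot_alt (matrix : List (List Int)) : Option (List Int) :=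
  let rows := matrix.length
  -- cols = len(matrix[0]); Pre_ excludes matrix = [] where Python raises IndexError
  let cols := (matrix.getD 0 []).length
  let g0 : List (List Int) := List.replicate rows (List.replicate cols 0)
  let danger := (List.range rows).foldl (fun g i =>
      (List.range cols).foldl (fun g j => pvScatterB matrix rows cols g (i, j)) g) g0
  let best := (List.range rows).foldl (fun b i =>
      (List.range cols).foldl (fun b j => pvSelB matrix danger b (i, j)) b)
    (none : Option (Int × List Int))
  best.map (·.2)

-- ===== PRECONDITION & SPEC =====
-- Pre_ excludes exactly the inputs where Python A raises IndexError: the empty matrix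
-- (len(matrix[0])) and matrices with a row shorter than row 0 (matrix[i][j] with j < cols).
def Pre_find_landing_spot (matrix : List (List Int)) : Prop :=
  matrix ≠ [] ∧ ∀ row ∈ matrix, (matrix.getD 0 []).length ≤ row.length
instance (matrix : List (List Int)) : Decidable (Pre_find_landing_spot matrix) := by
  unfold Pre_find_landing_spot; infer_instance

def pvWitness_find_landing_spot : List (List Int) := [[0, 1], [2, 0]]

def Spec_find_landing_spot (matrix : List (List Int)) (out : Option (List Int)) : Prop := out = find_landing_spot_alt matrix
instance (matrix : List (List Int)) (out : Option (List Int)) : Decidable (Spec_find_landing_spot matrix out) := by unfold Spec_find_landing_spot; infer_instance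

-- ===== CLAIM (what is proved, stated in full; the proofs are below) =====
def Claim_equal_find_landing_spot : Prop := ∀ (matrix : List (List Int)), Dom_find_landing_spot matrix → Pre_find_landing_spot matrix → Spec_find_landing_spot matrix (find_landing_spot matrix)

-- ===== LEMMAS AND PROOFS =====

-- row-major list of all grid cells; both double loops are folds over it
def pvCells (rows cols : Nat) : List (Nat × Nat) :=
  (List.range rows).flatMap (fun i => (List.range cols).map (fun j => (i, j)))

lemma pv_foldl_cells {α : Type} (f : α → Nat × Nat → α) (n m : Nat) (init : α) :
    (List.range n).foldl (fun s i => (List.range m).foldl (fun s j => f s (i, j)) s) init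
      = (pvCells n m).foldl f init := by
  simp [pvCells, List.foldl_flatMap, List.foldl_map]

lemma pv_mem_cells {c : Nat × Nat} {n m : Nat} :
    c ∈ pvCells n m ↔ c.1 < n ∧ c.2 < m := by
  obtain ⟨i, j⟩ := c
  simp [pvCells]

-- getD through List.modify
lemma pv_getD_modify {α : Type} (l : List α) (i j : Nat) (f : α → α) (d : α) :
    (l.modify i f).getD j d = if i = j ∧ j < l.length then f (l.getD j d) else l.getD j d := by
  by_cases h : j < l.length
  · rw [List.getD_eq_getElem?_getD, List.getElem?_modify, List.getElem?_eq_getElem h]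
    by_cases hij : i = j <;>
      simp [hij, h, List.getD_eq_getElem?_getD]
  · rw [List.getD_eq_getElem?_getD, List.getElem?_modify,
        List.getElem?_eq_none (by omega : l.length ≤ j),
        List.getD_eq_getElem?_getD, List.getElem?_eq_none (by omega : l.length ≤ j)]
    simp [h]

-- the grid keeps shape rows × cols throughout the scatter
def pvDims (rows cols : Nat) (g : List (List Int)) : Prop :=
  g.length = rows ∧ ∀ p, p < rows → (g.getD p []).length = cols

lemma pv_dims_g0 (rows cols : Nat) :
    pvDims rows cols (List.replicate rows (List.replicate cols (0 : Int))) := by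
  constructor
  · simp
  · intro p hp
    rw [List.getD_eq_getElem?_getD, List.getElem?_replicate, if_pos hp]
    simp

lemma pv_read_g0 (rows cols p q : Nat) :
    pvRead (List.replicate rows (List.replicate cols (0 : Int))) p q = 0 := by
  have h1 : ∀ n k : Nat, (List.replicate n (0 : Int)).getD k 0 = 0 := by
    intro n k
    rw [List.getD_eq_getElem?_getD, List.getElem?_replicate]
    split <;> rfl
  unfold pvRead
  rcases Nat.lt_or_ge p rows with hp | hp
  · have houter : (List.replicate rows (List.replicate cols (0 : Int))).getD p []
        = List.replicate cols 0 := by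
      rw [List.getD_eq_getElem?_getD, List.getElem?_replicate, if_pos hp]
      rfl
    rw [houter]
    exact h1 _ _
  · have houter : (List.replicate rows (List.replicate cols (0 : Int))).getD p [] = [] := by
      rw [List.getD_eq_getElem?_getD, List.getElem?_replicate, if_neg (by omega)]
      rfl
    rw [houter]
    rfl

lemma pv_dims_bump {rows cols : Nat} {g : List (List Int)} (hg : pvDims rows cols g)
    (ni nj : Nat) (v : Int) : pvDims rows cols (pvBump g ni nj v) := by
  obtain ⟨h1, h2⟩ := hg
  refine ⟨by simpa [pvBump] using h1, ?_⟩
  intro p hp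
  rw [pvBump, pv_getD_modify]
  split_ifs with h
  · simpa [List.length_modify] using h2 p hp
  · exact h2 p hp

lemma pv_read_bump {rows cols : Nat} {g : List (List Int)} (hg : pvDims rows cols g)
    {ni nj : Nat} (hni : ni < rows) (hnj : nj < cols) (v : Int) (p q : Nat) :
    pvRead (pvBump g ni nj v) p q = pvRead g p q + if p = ni ∧ q = nj then v else 0 := by
  obtain ⟨h1, h2⟩ := hg
  rw [pvRead, pvRead, pvBump, pv_getD_modify]
  by_cases hP : ni = p ∧ p < g.length
  · rw [if_pos hP]
    have hl : (g.getD p []).length = cols := h2 p (by omega)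
    rw [pv_getD_modify]
    by_cases hQ : nj = q
    · rw [if_pos ⟨hQ, by omega⟩, if_pos (by omega)]
    · rw [if_neg (by omega), if_neg (by omega)]
      simp
  · rw [if_neg hP, if_neg (by omega)]
    simp

-- one guarded bump, as it occurs in pvScatterB
lemma pv_read_gbump {rows cols : Nat} {g : List (List Int)} (hg : pvDims rows cols g)
    (a b v : Int) {p q : Nat} (hp : p < rows) (hq : q < cols) :
    pvRead (if 0 ≤ a ∧ a < (rows : Int) ∧ 0 ≤ b ∧ b < (cols : Int) then
        pvBump g a.toNat b.toNat v else g) p q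
      = pvRead g p q
        + (if (0 ≤ a ∧ a < (rows : Int) ∧ 0 ≤ b ∧ b < (cols : Int)) ∧ a = (p : Int) ∧ b = (q : Int)
           then v else 0) := by
  by_cases h : 0 ≤ a ∧ a < (rows : Int) ∧ 0 ≤ b ∧ b < (cols : Int)
  · rw [if_pos h]
    rw [pv_read_bump hg (by omega) (by omega) v p q]
    congr 1
    by_cases h2 : p = a.toNat ∧ q = b.toNat
    · rw [if_pos h2, if_pos ⟨h, by omega, by omega⟩]
    · rw [if_neg h2, if_neg (fun hc => h2 ⟨by omega, by omega⟩)]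
  · rw [if_neg h, if_neg (fun hc => h hc.1)]
    simp

lemma pv_dims_gbump {rows cols : Nat} {g : List (List Int)} (hg : pvDims rows cols g)
    (a b v : Int) :
    pvDims rows cols (if 0 ≤ a ∧ a < (rows : Int) ∧ 0 ≤ b ∧ b < (cols : Int) then
        pvBump g a.toNat b.toNat v else g) := by
  split_ifs with h
  · exact pv_dims_bump hg _ _ _
  · exact hg

-- indicator contribution of one scattered neighbour to the cell (p, q)
def pvInd (rows cols p q : Nat) (a b v : Int) : Int :=
  if (0 ≤ a ∧ a < (rows : Int) ∧ 0 ≤ b ∧ b < (cols : Int)) ∧ a = (p : Int) ∧ b = (q : Int)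
  then v else 0

-- total contribution of processing cell c to danger[p][q]
def pvDelta (matrix : List (List Int)) (rows cols : Nat) (c : Nat × Nat) (p q : Nat) : Int :=
  let v := (matrix.getD c.1 []).getD c.2 0
  pvInd rows cols p q ((c.1 : Int) - 1) (c.2 : Int) v
    + pvInd rows cols p q ((c.1 : Int) + 1) (c.2 : Int) v
    + pvInd rows cols p q (c.1 : Int) ((c.2 : Int) - 1) v
    + pvInd rows cols p q (c.1 : Int) ((c.2 : Int) + 1) v

lemma pv_dims_scatter {rows cols : Nat} {matrix g : List (List Int)} (hg : pvDims rows cols g)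
    (c : Nat × Nat) : pvDims rows cols (pvScatterB matrix rows cols g c) := by
  unfold pvScatterB
  simp only [List.foldl_cons, List.foldl_nil]
  exact pv_dims_gbump (pv_dims_gbump (pv_dims_gbump (pv_dims_gbump hg _ _ _) _ _ _) _ _ _) _ _ _

lemma pv_read_scatter {rows cols : Nat} {matrix g : List (List Int)} (hg : pvDims rows cols g)
    (c : Nat × Nat) {p q : Nat} (hp : p < rows) (hq : q < cols) :
    pvRead (pvScatterB matrix rows cols g c) p q
      = pvRead g p q + pvDelta matrix rows cols c p q := by
  unfold pvScatterB pvDelta pvInd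
  simp only [List.foldl_cons, List.foldl_nil]
  rw [pv_read_gbump (pv_dims_gbump (pv_dims_gbump (pv_dims_gbump hg _ _ _) _ _ _) _ _ _) _ _ _ hp hq,
      pv_read_gbump (pv_dims_gbump (pv_dims_gbump hg _ _ _) _ _ _) _ _ _ hp hq,
      pv_read_gbump (pv_dims_gbump hg _ _ _) _ _ _ hp hq,
      pv_read_gbump hg _ _ _ hp hq]
  ring

lemma pv_read_scatter_fold {rows cols : Nat} {matrix : List (List Int)}
    (L : List (Nat × Nat)) {g : List (List Int)} (hg : pvDims rows cols g)
    {p q : Nat} (hp : p < rows) (hq : q < cols) :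
    pvRead (L.foldl (pvScatterB matrix rows cols) g) p q
      = pvRead g p q + (L.map (fun c => pvDelta matrix rows cols c p q)).sum := by
  induction L generalizing g with
  | nil => simp
  | cons c L ih =>
    simp only [List.foldl_cons, List.map_cons, List.sum_cons]
    rw [ih (pv_dims_scatter hg c), pv_read_scatter hg c hp hq]
    ring

-- sum of a point indicator over a range
lemma pv_sum_range_ind (m : Nat) (t : Int) (f : Nat → Int) :
    ((List.range m).map (fun j : Nat => if (j : Int) = t then f j else 0)).sum
      = if 0 ≤ t ∧ t < (m : Int) then f t.toNat else 0 := by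
  induction m with
  | zero =>
    simp only [List.range_zero, List.map_nil, List.sum_nil]
    rw [if_neg (by omega)]
  | succ m ih =>
    rw [List.range_succ, List.map_append, List.sum_append]
    simp only [List.map_cons, List.map_nil, List.sum_cons, List.sum_nil, ih]
    by_cases h : (m : Int) = t
    · rw [if_pos h, if_neg (by omega), if_pos (by omega)]
      have ht : t.toNat = m := by omega
      rw [ht]
      ring
    · rw [if_neg h]
      by_cases h2 : 0 ≤ t ∧ t < (m : Int)
      · rw [if_pos h2, if_pos (by omega)]
        ring
      · rw [if_neg h2, if_neg (by omega)]
        ring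

-- a sum over all cells is a double sum over the two ranges
lemma pv_sum_cells (n m : Nat) (h : Nat × Nat → Int) :
    ((pvCells n m).map h).sum
      = ((List.range n).map (fun i => ((List.range m).map (fun j => h (i, j))).sum)).sum := by
  unfold pvCells
  induction List.range n with
  | nil => simp
  | cons a L ih =>
    simp only [List.flatMap_cons, List.map_append, List.sum_append, List.map_cons,
      List.sum_cons, List.map_map, ih]
    simp [Function.comp_def]

-- sum of a point indicator over all cells
lemma pv_sum_cells_ind (n m : Nat) (ti tj : Int) (f : Nat → Nat → Int) :
    ((pvCells n m).map (fun c => if (c.1 : Int) = ti ∧ (c.2 : Int) = tj then f c.1 c.2 else 0)).sum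
      = if 0 ≤ ti ∧ ti < (n : Int) ∧ 0 ≤ tj ∧ tj < (m : Int) then f ti.toNat tj.toNat else 0 := by
  rw [pv_sum_cells]
  have inner : ∀ i : Nat,
      ((List.range m).map (fun j : Nat => if (i : Int) = ti ∧ (j : Int) = tj then f i j else 0)).sum
        = if (i : Int) = ti then (if 0 ≤ tj ∧ tj < (m : Int) then f i tj.toNat else 0) else 0 := by
    intro i
    by_cases hi : (i : Int) = ti
    · rw [if_pos hi]
      have he : (fun j : Nat => if (i : Int) = ti ∧ (j : Int) = tj then f i j else 0)
          = fun j : Nat => if (j : Int) = tj then f i j else 0 := by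
        funext j
        by_cases hj : (j : Int) = tj <;> simp [hi, hj]
      rw [he, pv_sum_range_ind m tj (f i)]
    · rw [if_neg hi]
      have he : (fun j : Nat => if (i : Int) = ti ∧ (j : Int) = tj then f i j else 0)
          = fun _ : Nat => (0 : Int) := by
        funext j
        simp [hi]
      rw [he]
      simp
  simp only [inner]
  rw [pv_sum_range_ind n ti (fun i => if 0 ≤ tj ∧ tj < (m : Int) then f i tj.toNat else 0)]
  split_ifs <;> first | rfl | (exfalso; omega)

-- one scattered direction summed over all cells
lemma pv_sum_ind_dir (matrix : List (List Int)) (rows cols : Nat) (dx dy : Int)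
    {p q : Nat} (hp : p < rows) (hq : q < cols) :
    ((pvCells rows cols).map (fun c =>
        pvInd rows cols p q ((c.1 : Int) + dx) ((c.2 : Int) + dy)
          ((matrix.getD c.1 []).getD c.2 0))).sum
      = if 0 ≤ (p : Int) - dx ∧ (p : Int) - dx < (rows : Int)
            ∧ 0 ≤ (q : Int) - dy ∧ (q : Int) - dy < (cols : Int) then
          (matrix.getD ((p : Int) - dx).toNat []).getD ((q : Int) - dy).toNat 0
        else 0 := by
  have he : (fun c : Nat × Nat =>
        pvInd rows cols p q ((c.1 : Int) + dx) ((c.2 : Int) + dy)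
          ((matrix.getD c.1 []).getD c.2 0))
      = fun c : Nat × Nat =>
          if (c.1 : Int) = (p : Int) - dx ∧ (c.2 : Int) = (q : Int) - dy then
            (matrix.getD c.1 []).getD c.2 0
          else 0 := by
    funext c
    unfold pvInd
    split_ifs with h1 h2
    · rfl
    · exact absurd ⟨by omega, by omega⟩ h2
    · exact absurd ⟨⟨by omega, by omega, by omega, by omega⟩, by omega, by omega⟩ h1
    · rfl
  rw [he, pv_sum_cells_ind rows cols ((p : Int) - dx) ((q : Int) - dy)
        (fun i j => (matrix.getD i []).getD j 0)]

lemma pv_if_add (c : Prop) [Decidable c] (d x : Int) :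
    (if c then d + x else d) = d + (if c then x else 0) := by
  split_ifs <;> simp

-- the scattered contributions at (p, q) sum exactly to A's gathered danger_sum
lemma pv_scatter_sum_eq_gather {rows cols : Nat} (matrix : List (List Int))
    {p q : Nat} (hp : p < rows) (hq : q < cols) :
    ((pvCells rows cols).map (fun c => pvDelta matrix rows cols c p q)).sum
      = pvGatherA matrix rows cols p q := by
  have h1 := pv_sum_ind_dir matrix rows cols (-1) 0 hp hq
  have h2 := pv_sum_ind_dir matrix rows cols 1 0 hp hq
  have h3 := pv_sum_ind_dir matrix rows cols 0 (-1) hp hq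
  have h4 := pv_sum_ind_dir matrix rows cols 0 1 hp hq
  simp only [Int.sub_neg, sub_zero, add_zero] at h1 h2 h3 h4
  simp only [pvDelta, List.sum_map_add, sub_eq_add_neg] at *
  rw [h1, h2, h3, h4]
  unfold pvGatherA pvDirsA
  simp only [List.foldl_cons, List.foldl_nil, pv_if_add, add_zero]
  ring

-- relating B's best (danger, spot) to A's (safest_spot, min_danger) pair
def pvPhi (b : Option (Int × List Int)) : Option (List Int) × Option Int :=
  (b.map (·.2), b.map (·.1))

lemma pv_sel_step {matrix danger : List (List Int)} {rows cols : Nat}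
    (b : Option (Int × List Int)) (c : Nat × Nat)
    (hd : pvGatherA matrix rows cols c.1 c.2 = pvRead danger c.1 c.2) :
    pvStepA matrix rows cols (pvPhi b) c = pvPhi (pvSelB matrix danger b c) := by
  unfold pvStepA pvSelB
  by_cases hz : (matrix.getD c.1 []).getD c.2 0 = 0
  · rw [if_pos hz, if_pos hz]
    cases b with
    | none => simp [pvPhi, hd]
    | some b =>
      show (match (pvPhi (some b)).2 with
        | none => (some [(c.1 : Int), (c.2 : Int)], some (pvGatherA matrix rows cols c.1 c.2))
        | some m => if pvGatherA matrix rows cols c.1 c.2 < m then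
            (some [(c.1 : Int), (c.2 : Int)], some (pvGatherA matrix rows cols c.1 c.2))
          else pvPhi (some b)) = _
      simp only [pvPhi, Option.map_some, hd]
      split_ifs <;> rfl
  · rw [if_neg hz, if_neg hz]

lemma pv_sel_fold {matrix danger : List (List Int)} {rows cols : Nat}
    (L : List (Nat × Nat)) (b : Option (Int × List Int))
    (hL : ∀ c ∈ L, pvGatherA matrix rows cols c.1 c.2 = pvRead danger c.1 c.2) :
    L.foldl (pvStepA matrix rows cols) (pvPhi b) = pvPhi (L.foldl (pvSelB matrix danger) b) := by
  induction L generalizing b with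
  | nil => rfl
  | cons c L ih =>
    simp only [List.foldl_cons]
    rw [pv_sel_step b c (hL c (by simp)), ih _ (fun c hc => hL c (by simp [hc]))]

-- ===== VERDICT (by name: the statement is the Claim_ definition above) =====
theorem find_landing_spot_spec : Claim_equal_find_landing_spot := by
  intro matrix _ _
  unfold Spec_find_landing_spot find_landing_spot find_landing_spot_alt
  simp only
  rw [pv_foldl_cells (pvStepA matrix matrix.length (matrix.getD 0 []).length),
      pv_foldl_cells (pvScatterB matrix matrix.length (matrix.getD 0 []).length),
      pv_foldl_cells (pvSelB matrix _)]
  have hkey : ∀ c ∈ pvCells matrix.length (matrix.getD 0 []).length,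
      pvGatherA matrix matrix.length (matrix.getD 0 []).length c.1 c.2
        = pvRead ((pvCells matrix.length (matrix.getD 0 []).length).foldl
            (pvScatterB matrix matrix.length (matrix.getD 0 []).length)
            (List.replicate matrix.length (List.replicate (matrix.getD 0 []).length 0))) c.1 c.2 := by
    intro c hc
    obtain ⟨h1, h2⟩ := pv_mem_cells.mp hc
    rw [pv_read_scatter_fold _ (pv_dims_g0 _ _) h1 h2, pv_read_g0,
        pv_scatter_sum_eq_gather matrix h1 h2]
    ring
  rw [show ((none, none) : Option (List Int) × Option Int) = pvPhi none from rfl,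
      pv_sel_fold _ none hkey]
  rfl
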